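-- pv_equiv track=rewrite | github.com/GSD-3726/TY | main.py | deduplicate_urls_per_channel
-- ===== SOURCE A (Python) =====
-- from collections import defaultdict
-- from typing import Dict, List, Tuple, Optional, Any
--
-- def deduplicate_urls_per_channel(channel_map: Dict[Tuple[str, str], List[str]]) -> Dict[Tuple[str, str], List[str]]:
--     """
--     确保每个 URL 只出现在一个频道中。
--     如果同一 URL 被多个频道引用，则根据以下规则保留一个：
--       - 优先保留名称中包含 '+' 或 'plus' 的（如 CCTV-5+）
--       - 否则保留名称较长的（更具体）
--     """
--     # 构建 URL -> 频道列表的映射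
--     url_to_channels = defaultdict(list)
--     for (group, name), urls in channel_map.items():
--         for url in urls:
--             url_to_channels[url].append((group, name))
--
--     # 决定每个 URL 应保留的频道
--     url_to_chosen = {}
--     for url, channels in url_to_channels.items():
--         if len(channels) == 1:
--             url_to_chosen[url] = channels[0]
--         else:
--             # 规则：优先选择名称包含 '+' 或 'plus' 的
--             plus_channels = [ch for ch in channels if '+' in ch[1].lower() or 'plus' in ch[1].lower()]
--             if plus_channels:
--                 chosen = plus_channels[0]  # 如果有多个，取第一个
--             else:
--                 # 否则选择名称最长的（更具体）
--                 chosen = max(channels, key=lambda ch: len(ch[1]))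
--             url_to_chosen[url] = chosen
--
--     # 重新构建去重后的频道映射
--     new_map = defaultdict(list)
--     for (group, name), urls in channel_map.items():
--         for url in urls:
--             if url_to_chosen[url] == (group, name):
--                 new_map[(group, name)].append(url)
--     return dict(new_map)
-- ===== SOURCE B (Python) =====
-- def deduplicate_urls_per_channel(channel_map):
--     """Single-pass dedup: fold channel_map keeping, per URL, the best channel so far."""
--     def is_plus(name):
--         n = name.lower()
--         return '+' in n or 'plus' in n
--
--     def better(inc, cand):
--         # incumbent wins unless the candidate strictly improves it
--         if is_plus(inc[1]):
--             return inc
--         if is_plus(cand[1]):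
--             return cand
--         return cand if len(cand[1]) > len(inc[1]) else inc
--
--     chosen = {}
--     for (group, name), urls in channel_map.items():
--         for url in urls:
--             cand = (group, name)
--             chosen[url] = better(chosen[url], cand) if url in chosen else cand
--
--     out = {}
--     for (group, name), urls in channel_map.items():
--         for url in urls:
--             if chosen[url] == (group, name):
--                 out[(group, name)] = out.get((group, name), []) + [url]
--     return out
-- ===== Notes on version B (the rewrite author's own statement) =====
-- stated objective: simpler
-- what changed: A builds a full url->list-of-channels index and then selects per url (singleton / first plus-named / first longest-named); B makes a single fold over channel_map keeping only the current best channel per url under an equivalent replacement rule (a plus incumbent is never replaced, a plus candidate beats a non-plus incumbent, otherwise only a strictly longer name wins), followed by the same rebuild pass.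
import Mathlib
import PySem

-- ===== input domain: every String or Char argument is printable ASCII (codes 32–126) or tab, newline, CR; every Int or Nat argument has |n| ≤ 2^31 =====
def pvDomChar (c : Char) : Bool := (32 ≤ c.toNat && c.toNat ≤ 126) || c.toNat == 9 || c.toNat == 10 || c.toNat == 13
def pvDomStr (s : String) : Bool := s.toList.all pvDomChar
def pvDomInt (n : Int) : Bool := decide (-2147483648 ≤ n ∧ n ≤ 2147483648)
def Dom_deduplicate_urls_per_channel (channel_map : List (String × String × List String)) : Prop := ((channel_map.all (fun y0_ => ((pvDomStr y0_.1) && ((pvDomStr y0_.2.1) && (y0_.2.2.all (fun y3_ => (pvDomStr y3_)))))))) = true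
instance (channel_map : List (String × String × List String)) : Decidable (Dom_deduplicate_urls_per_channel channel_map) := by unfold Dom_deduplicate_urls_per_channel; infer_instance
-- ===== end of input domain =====

-- B replaces A's build-all-channel-lists-then-select passes by a single fold keeping, per URL,
-- the best channel seen so far (objective: simpler); return values proved equal on all inputs.

-- ===== PORT A =====

-- '+' in name.lower() or 'plus' in name.lower()
def pvIsPlus (name : String) : Bool :=
  PySem.Str.isIn "+" (PySem.Str.lower name) || PySem.Str.isIn "plus" (PySem.Str.lower name)

-- url_to_channels: defaultdict(list) append loop
def pvAChannels (channel_map : List (String × String × List String)) :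
    PySem.Dict String (List (String × String)) :=
  channel_map.foldl (fun d ch =>
    ch.2.2.foldl (fun d url => d.modify url [] (· ++ [(ch.1, ch.2.1)])) d) PySem.Dict.empty

-- url_to_chosen: one entry per url of url_to_channels (iterated in insertion order)
def pvAChosen (channel_map : List (String × String × List String)) :
    PySem.Dict String (String × String) :=
  (pvAChannels channel_map).items.foldl (fun d p =>
    let channels := p.2
    if channels.length = 1 then
      d.insert p.1 (channels.headD ("", ""))   -- channels[0]; a key's list is never empty
    else
      let plus_channels := channels.filter (fun ch => pvIsPlus ch.2)
      match plus_channels with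
      | c :: _ => d.insert p.1 c
      | [] => d.insert p.1 ((PySem.List.max? channels (fun ch => PySem.Str.len ch.2)).getD ("", "")))
    PySem.Dict.empty

def deduplicate_urls_per_channel (channel_map : List (String × String × List String)) :
    List (String × String × List String) :=
  let url_to_chosen := pvAChosen channel_map
  -- rebuild: new_map[(group,name)].append(url) when url_to_chosen[url] == (group,name)
  -- (url_to_chosen[url] never raises: every url of channel_map got an entry)
  let new_map : PySem.Dict (String × String) (List String) :=
    channel_map.foldl (fun d ch =>
      ch.2.2.foldl (fun d url =>
        match url_to_chosen.get? url with
        | some c => if c = (ch.1, ch.2.1) then d.modify (ch.1, ch.2.1) [] (· ++ [url]) else d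
        | none => d) d) PySem.Dict.empty
  new_map.items.map (fun p => (p.1.1, p.1.2, p.2))

-- ===== PORT B =====

-- incumbent wins unless the candidate strictly improves it
def pvBetter (inc cand : String × String) : String × String :=
  if pvIsPlus inc.2 then inc
  else if pvIsPlus cand.2 then cand
  else if PySem.Str.len inc.2 < PySem.Str.len cand.2 then cand else inc

-- chosen: single pass, best channel so far per url
def pvBChosen (channel_map : List (String × String × List String)) :
    PySem.Dict String (String × String) :=
  channel_map.foldl (fun d ch =>
    ch.2.2.foldl (fun d url =>
      match d.get? url with
      | some inc => d.insert url (pvBetter inc (ch.1, ch.2.1))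
      | none => d.insert url (ch.1, ch.2.1)) d) PySem.Dict.empty

def deduplicate_urls_per_channel_alt (channel_map : List (String × String × List String)) :
    List (String × String × List String) :=
  let chosen := pvBChosen channel_map
  -- out[(group,name)] = out.get((group,name), []) + [url] when chosen[url] == (group,name)
  let out : PySem.Dict (String × String) (List String) :=
    channel_map.foldl (fun d ch =>
      ch.2.2.foldl (fun d url =>
        match chosen.get? url with
        | some c => if c = (ch.1, ch.2.1) then
            d.insert (ch.1, ch.2.1) (d.getD (ch.1, ch.2.1) [] ++ [url]) else d
        | none => d) d) PySem.Dict.empty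
  out.items.map (fun p => (p.1.1, p.1.2, p.2))

-- ===== PRECONDITION & SPEC =====
def Spec_deduplicate_urls_per_channel (channel_map : List (String × String × List String)) (out : List (String × String × List String)) : Prop := out = deduplicate_urls_per_channel_alt channel_map
instance (channel_map : List (String × String × List String)) (out : List (String × String × List String)) : Decidable (Spec_deduplicate_urls_per_channel channel_map out) := by unfold Spec_deduplicate_urls_per_channel; infer_instance

-- ===== CLAIM (what is proved, stated in full; the proofs are below) =====
def Claim_equal_deduplicate_urls_per_channel : Prop := ∀ (channel_map : List (String × String × List String)), Dom_deduplicate_urls_per_channel channel_map → Spec_deduplicate_urls_per_channel channel_map (deduplicate_urls_per_channel channel_map)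

-- ===== LEMMAS AND PROOFS =====

-- the (url, (group, name)) occurrences of channel_map, flattened in iteration order
def pvPairs (channel_map : List (String × String × List String)) :
    List (String × (String × String)) :=
  channel_map.flatMap (fun ch => ch.2.2.map (fun url => (url, (ch.1, ch.2.1))))

-- the channels that reference url, in order (= A's url_to_channels[url])
def pvCollect (channel_map : List (String × String × List String)) (url : String) :
    List (String × String) :=
  ((pvPairs channel_map).filter (fun p => p.1 == url)).map (·.2)

-- A's selection rule as a function of the collected channel list
def pvPick (channels : List (String × String)) : String × String :=
  if channels.length = 1 then channels.headD ("", "")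
  else
    match channels.filter (fun ch => pvIsPlus ch.2) with
    | c :: _ => c
    | [] => (PySem.List.max? channels (fun ch => PySem.Str.len ch.2)).getD ("", "")

-- pvPick without the singleton special case
def pvPick' (channels : List (String × String)) : String × String :=
  match channels.filter (fun ch => pvIsPlus ch.2) with
  | c :: _ => c
  | [] => (PySem.List.max? channels (fun ch => PySem.Str.len ch.2)).getD ("", "")

-- B's per-url accumulator step
def pvStepO (o : Option (String × String)) (c : String × String) : Option (String × String) :=
  match o with
  | some inc => some (pvBetter inc c)
  | none => some c

-- nested channel/url loop = loop over the flattened pairs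
theorem pv_flatten {σ : Type} (body : σ → String × (String × String) → σ)
    (cm : List (String × String × List String)) (d0 : σ) :
    cm.foldl (fun d ch => ch.2.2.foldl (fun d url => body d (url, (ch.1, ch.2.1))) d) d0
      = (pvPairs cm).foldl body d0 := by
  induction cm generalizing d0 with
  | nil => rfl
  | cons ch t ih =>
      simp only [List.foldl_cons, pvPairs, List.flatMap_cons, List.foldl_append, List.foldl_map]
      exact ih _

-- characterisation of B's chosen dict
theorem pvB_fold (l : List (String × (String × String)))
    (d : PySem.Dict String (String × String)) (k : String) :
    (l.foldl (fun d p =>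
        match d.get? p.1 with
        | some inc => d.insert p.1 (pvBetter inc p.2)
        | none => d.insert p.1 p.2) d).get? k
      = ((l.filter (fun p => p.1 == k)).map (·.2)).foldl pvStepO (d.get? k) := by
  induction l generalizing d with
  | nil => rfl
  | cons p t ih =>
      by_cases hk : p.1 = k
      · subst hk
        have h1 : ∀ d' : PySem.Dict String (String × String), d'.get? p.1 = pvStepO (d.get? p.1) p.2 →
            (t.foldl (fun d p =>
              match d.get? p.1 with
              | some inc => d.insert p.1 (pvBetter inc p.2)
              | none => d.insert p.1 p.2) d').get? p.1
            = ((t.filter (fun q => q.1 == p.1)).map (·.2)).foldl pvStepO (pvStepO (d.get? p.1) p.2) := by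
          intro d' hd'; rw [ih d', hd']
        simp only [List.foldl_cons, List.filter_cons, BEq.rfl, if_pos, List.map_cons]
        cases hg : d.get? p.1 with
        | none =>
            have := h1 (d.insert p.1 p.2) (by rw [PySem.Dict.get?_insert_self, hg]; rfl)
            rw [hg] at this; exact this
        | some inc =>
            have := h1 (d.insert p.1 (pvBetter inc p.2))
              (by rw [PySem.Dict.get?_insert_self, hg]; rfl)
            rw [hg] at this; exact this
      · have hb : (p.1 == k) = false := by simp [hk]
        simp only [List.foldl_cons, List.filter_cons, hb, if_neg, Bool.false_eq_true,
          not_false_iff]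
        cases hg : d.get? p.1 with
        | none => rw [ih, PySem.Dict.get?_insert_of_ne _ _ (fun h => hk h.symm)]
        | some inc => rw [ih, PySem.Dict.get?_insert_of_ne _ _ (fun h => hk h.symm)]

-- get? of an insert-loop over fresh distinct keys
theorem pv_insert_fold (g : String × List (String × String) → String × String)
    (l : List (String × List (String × String))) (k : String)
    (d : PySem.Dict String (String × String))
    (hfresh : ∀ p ∈ l, d.contains p.1 = false) (hnd : (l.map (·.1)).Nodup) :
    (l.foldl (fun d p => d.insert p.1 (g p)) d).get? k
      = ((l.find? (fun p => p.1 == k)).map g).or (d.get? k) := by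
  induction l generalizing d with
  | nil => rfl
  | cons p t ih =>
      simp only [List.map_cons, List.nodup_cons] at hnd
      have hfresh' : ∀ q ∈ t, (d.insert p.1 (g p)).contains q.1 = false := by
        intro q hq
        rw [PySem.Dict.contains_insert]
        have : (q.1 == p.1) = false := by
          simp only [beq_eq_false_iff_ne, ne_eq]
          intro h; exact hnd.1 (h ▸ List.mem_map_of_mem hq)
        rw [this, hfresh q (List.mem_cons_of_mem _ hq), Bool.or_false]
      rw [List.foldl_cons, ih _ hfresh' hnd.2, List.find?_cons]
      by_cases hk : p.1 = k
      · subst hk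
        have hnone : t.find? (fun q => q.1 == p.1) = none := by
          rw [List.find?_eq_none]
          intro q hq
          simp only [beq_iff_eq]
          intro h; exact hnd.1 (h ▸ List.mem_map_of_mem hq)
        simp [hnone, PySem.Dict.get?_insert_self]
      · have hb : (p.1 == k) = false := by simp [hk]
        rw [hb]
        rw [PySem.Dict.get?_insert_of_ne _ _ (fun h => hk h.symm)]

theorem pvPick'_single (c : String × String) : pvPick' [c] = c := by
  unfold pvPick'
  by_cases h : pvIsPlus c.2 <;> simp [h, PySem.List.max?]

theorem pvPick_eq_pick' (chs : List (String × String)) (h : chs ≠ []) :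
    pvPick chs = pvPick' chs := by
  match chs with
  | [] => exact absurd rfl h
  | [c] =>
      rw [pvPick'_single]
      simp [pvPick]
  | c :: c' :: t =>
      unfold pvPick pvPick'
      simp

theorem pvPick'_append (chs : List (String × String)) (c : String × String) (h : chs ≠ []) :
    pvPick' (chs ++ [c]) = pvBetter (pvPick' chs) c := by
  unfold pvPick'
  cases hf : chs.filter (fun ch => pvIsPlus ch.2) with
  | cons p t =>
      have hp : pvIsPlus p.2 = true := by
        have : p ∈ chs.filter (fun ch => pvIsPlus ch.2) := by rw [hf]; exact List.mem_cons_self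
        exact (List.mem_filter.mp this).2
      rw [List.filter_append, hf]
      simp [pvBetter, hp]
  | nil =>
      obtain ⟨m, hm⟩ : ∃ m, PySem.List.max? chs (fun ch => PySem.Str.len ch.2) = some m := by
        cases hmm : PySem.List.max? chs (fun ch => PySem.Str.len ch.2) with
        | none => exact absurd ((PySem.List.max?_eq_none_iff chs _).mp hmm) h
        | some m => exact ⟨m, rfl⟩
      have hmp : pvIsPlus m.2 = false := by
        have hmem := PySem.List.max?_mem hm
        by_contra hc
        have : m ∈ chs.filter (fun ch => pvIsPlus ch.2) :=
          List.mem_filter.mpr ⟨hmem, by simpa using hc⟩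
        rw [hf] at this; exact absurd this (List.not_mem_nil)
      simp only [List.filter_append, hf, List.nil_append, hm, Option.getD_some]
      by_cases hc : pvIsPlus c.2
      · simp [hc, pvBetter, hmp]
      · have hcb : pvIsPlus c.2 = false := by simpa using hc
        simp only [List.filter_cons, hcb, Bool.false_eq_true, if_neg, not_false_iff,
          List.filter_nil]
        have hm' := hm
        simp only [PySem.List.max?] at hm' ⊢
        rw [List.foldl_append, hm', List.foldl_cons, List.foldl_nil]
        simp only [pvBetter, hmp, hcb, Bool.false_eq_true, if_neg, not_false_iff]
        split <;> simp

theorem pv_fold_pick (chs : List (String × String)) (h : chs ≠ []) :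
    chs.foldl pvStepO none = some (pvPick' chs) := by
  induction chs using List.reverseRecOn with
  | nil => exact absurd rfl h
  | append_singleton l c ih =>
      cases l with
      | nil => simp [pvStepO, pvPick'_single]
      | cons p t =>
          rw [List.foldl_append, ih (by simp), List.foldl_cons, List.foldl_nil,
            pvPick'_append _ _ (by simp)]
          rfl

theorem pvAChannels_eq (cm : List (String × String × List String)) :
    pvAChannels cm
      = (pvPairs cm).foldl (fun d p => d.modify p.1 [] (· ++ [p.2])) PySem.Dict.empty := by
  unfold pvAChannels
  exact pv_flatten (fun d p => d.modify p.1 [] (· ++ [p.2])) cm PySem.Dict.empty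

theorem pvBChosen_eq (cm : List (String × String × List String)) :
    pvBChosen cm
      = (pvPairs cm).foldl (fun d p =>
          match d.get? p.1 with
          | some inc => d.insert p.1 (pvBetter inc p.2)
          | none => d.insert p.1 p.2) PySem.Dict.empty := by
  unfold pvBChosen
  exact pv_flatten (fun d p =>
    match d.get? p.1 with
    | some inc => d.insert p.1 (pvBetter inc p.2)
    | none => d.insert p.1 p.2) cm PySem.Dict.empty

theorem pvAChannels_keys_mem (cm : List (String × String × List String)) (k : String) :
    k ∈ (pvAChannels cm).keys ↔ k ∈ (pvPairs cm).map (·.1) := by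
  rw [pvAChannels_eq]
  rw [PySem.Dict.keys_foldl_modify_key (pvPairs cm) (fun p => p.1) []
    (fun _ p => (· ++ [p.2])) PySem.Dict.empty]
  rw [PySem.Dict.keys_empty]
  simp [PySem.Set.mem_update]

theorem pvCollect_ne_nil_iff (cm : List (String × String × List String)) (k : String) :
    pvCollect cm k ≠ [] ↔ k ∈ (pvPairs cm).map (·.1) := by
  unfold pvCollect
  simp only [ne_eq, List.map_eq_nil_iff, List.filter_eq_nil_iff, List.mem_map]
  constructor
  · intro h
    simp only [not_forall] at h
    obtain ⟨p, hp, hpk⟩ := h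
    exact ⟨p, hp, by simpa using hpk⟩
  · rintro ⟨p, hp, hpk⟩ h
    exact absurd (by simpa using hpk : (p.1 == k) = true) (by simpa using h p hp)

-- A's url_to_channels lookups
theorem pvAChannels_get? (cm : List (String × String × List String)) (k : String) :
    (pvAChannels cm).get? k
      = if pvCollect cm k = [] then none else some (pvCollect cm k) := by
  have hgetD : (pvAChannels cm).getD k [] = pvCollect cm k := by
    rw [pvAChannels_eq]
    rw [PySem.Dict.getD_foldl_modify_append (pvPairs cm) PySem.Dict.empty k]
    rw [PySem.Dict.getD_empty]
    rfl
  by_cases hc : pvCollect cm k = []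
  · rw [if_pos hc, PySem.Dict.get?_eq_none_iff_not_mem_keys, pvAChannels_keys_mem]
    intro hmem
    exact absurd hc ((pvCollect_ne_nil_iff cm k).mpr hmem)
  · rw [if_neg hc]
    have hmem : k ∈ (pvAChannels cm).keys :=
      (pvAChannels_keys_mem cm k).mpr ((pvCollect_ne_nil_iff cm k).mp hc)
    have hcon : (pvAChannels cm).contains k = true :=
      (PySem.Dict.contains_iff_mem_keys _ k).mpr hmem
    rw [PySem.Dict.contains_eq_isSome_get?] at hcon
    cases hg : (pvAChannels cm).get? k with
    | none => rw [hg] at hcon; simp at hcon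
    | some v =>
        rw [PySem.Dict.getD_eq_get?_getD, hg] at hgetD
        simpa using hgetD

theorem pvAChannels_nodup_keys (cm : List (String × String × List String)) :
    (pvAChannels cm).keys.Nodup := by
  rw [pvAChannels_eq]
  exact PySem.Dict.nodup_keys_foldl_modify_key (pvPairs cm) (fun p => p.1) []
    (fun _ p => (· ++ [p.2])) PySem.Dict.empty PySem.Dict.nodup_keys_empty

-- the crux: both chosen dicts agree everywhere
theorem pvChosen_agree (cm : List (String × String × List String)) (k : String) :
    (pvAChosen cm).get? k = (pvBChosen cm).get? k := by
  have hB : (pvBChosen cm).get? k = (pvCollect cm k).foldl pvStepO none := by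
    rw [pvBChosen_eq, pvB_fold, PySem.Dict.get?_empty]; rfl
  have hA : (pvAChosen cm).get? k
      = (((pvAChannels cm).items.find? (fun p => p.1 == k)).map
          (fun p => pvPick p.2)).or none := by
    have hbody : (pvAChosen cm)
        = (pvAChannels cm).items.foldl
            (fun d p => d.insert p.1 (pvPick p.2)) PySem.Dict.empty := by
      unfold pvAChosen
      congr 1
      funext d p
      by_cases h1 : p.2.length = 1
      · simp [pvPick, h1]
      · cases hf : p.2.filter (fun ch => pvIsPlus ch.2) <;> simp [pvPick, h1, hf]
    rw [hbody]
    refine pv_insert_fold _ _ k _ (fun p _ => PySem.Dict.contains_empty p.1) ?_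
    have := pvAChannels_nodup_keys cm
    simpa [PySem.Dict.keys] using this
  rw [hA, hB, Option.or_none]
  have hch : ((pvAChannels cm).items.find? (fun p => p.1 == k)).map (·.2)
      = (pvAChannels cm).get? k := rfl
  cases hf : (pvAChannels cm).items.find? (fun p => p.1 == k) with
  | none =>
      have hg : (pvAChannels cm).get? k = none := by rw [← hch, hf]; rfl
      rw [pvAChannels_get?] at hg
      split at hg
      · next hc => rw [hc]; rfl
      · exact absurd hg (by simp)
  | some p =>
      have hg : (pvAChannels cm).get? k = some p.2 := by rw [← hch, hf]; rfl
      rw [pvAChannels_get?] at hg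
      split at hg
      · exact absurd hg (by simp)
      · next hc =>
          have hp2 : p.2 = pvCollect cm k := by simpa using hg.symm
          rw [Option.map_some, hp2, pvPick_eq_pick' _ hc, pv_fold_pick _ hc]

-- ===== VERDICT (by name: the statement is the Claim_ definition above) =====
theorem deduplicate_urls_per_channel_spec : Claim_equal_deduplicate_urls_per_channel := by
  intro cm _
  unfold Spec_deduplicate_urls_per_channel deduplicate_urls_per_channel deduplicate_urls_per_channel_alt
  simp only [pvChosen_agree cm, PySem.Dict.modify]
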